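-- pv_equiv track=rewrite | github.com/sadegh16/HRC | graph_utils.py | find_discoverable_parents
-- ===== SOURCE A (Python) =====
-- def find_discoverable_parents(adj_matrix, gate_types):
--     n = len(adj_matrix)  # Number of gates
--     discoverable_adj_matrix = [[0] * n for _ in range(n)]
--
--     for i in range(n):  # Iterate over each gate
--         gate_type = gate_types[i]
--         parents = [j for j in range(n) if adj_matrix[j][i] == 1]  # Find parents of gate i
--
--         for j in parents:
--             other_parents = [p for p in parents if p != j]
--
--             if gate_type == 'OR':
--                 # For OR gates, parent j is discoverable if it can be the sole activator
--                 # Check if no other parent can activate the gate i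
--                 if all(adj_matrix[p][i] == 0 for p in other_parents):
--                     discoverable_adj_matrix[j][i] = 1
--
--             elif gate_type == 'AND':
--                 # For AND gates, parent j is discoverable if gate i remains active even if j is off
--                 # Check if all other parents can keep the gate active
--                 if all(adj_matrix[p][i] == 1 for p in other_parents):
--                     discoverable_adj_matrix[j][i] = 1
--
--     return discoverable_adj_matrix
-- ===== SOURCE B (Python) =====
-- def find_discoverable_parents(adj_matrix, gate_types):
--     n = len(adj_matrix)
--     # One row-major pass: collect each column's parents; list.index scans at C speed.
--     parents = [[] for _ in range(n)]
--     for j, row in enumerate(adj_matrix):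
--         start = 0
--         while True:
--             try:
--                 i = row.index(1, start, n)
--             except ValueError:
--                 break
--             parents[i].append(j)
--             start = i + 1
--     out = [[0] * n for _ in range(n)]
--     for i in range(n):
--         col = parents[i]
--         gt = gate_types[i]
--         if gt == 'AND':
--             # every parent is discoverable: the remaining parents all feed the gate
--             for j in col:
--                 out[j][i] = 1
--         elif gt == 'OR' and len(col) == 1:
--             # a parent is discoverable only when it is the sole parent
--             out[col[0]][i] = 1
--     return out
-- ===== Notes on version B (the rewrite author's own statement) =====
-- stated objective: alternative
-- what changed: B drops A's per-parent rescans of the parent list (other_parents plus an all() scan for every parent of every gate) in favour of one row-major pass that collects each column's parent list once via list.index scanning, then marks all parents for AND gates and the sole parent for OR gates with exactly one parent.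
import Mathlib
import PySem

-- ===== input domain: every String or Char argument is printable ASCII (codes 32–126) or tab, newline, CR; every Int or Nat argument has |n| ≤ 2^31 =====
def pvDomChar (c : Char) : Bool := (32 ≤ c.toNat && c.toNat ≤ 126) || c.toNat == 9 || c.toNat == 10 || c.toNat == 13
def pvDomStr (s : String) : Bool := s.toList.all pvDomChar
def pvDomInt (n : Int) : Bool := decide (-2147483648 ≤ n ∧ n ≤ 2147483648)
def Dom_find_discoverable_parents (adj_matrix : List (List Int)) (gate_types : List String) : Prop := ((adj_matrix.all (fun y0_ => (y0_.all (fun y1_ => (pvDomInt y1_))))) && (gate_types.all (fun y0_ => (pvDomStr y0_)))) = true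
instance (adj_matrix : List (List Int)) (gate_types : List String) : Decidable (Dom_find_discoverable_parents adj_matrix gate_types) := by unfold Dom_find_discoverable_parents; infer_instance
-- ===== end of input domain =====

-- B replaces A's per-parent rescans of the parent list with one row-major pass that collects
-- each column's parent list once (AND marks every parent; OR marks the sole parent when exactly
-- one exists).  Both ports read cells / gate types with a default after the bound check Pre_ gives.

-- shared low-level helpers (both Pythons index the same way): adj_matrix[j][i] and out[j][i] = 1
def pvCell (adj : List (List Int)) (j i : Nat) : Int := (adj.getD j []).getD i 0
def pvSet2 (m : List (List Int)) (j i : Nat) : List (List Int) := m.set j ((m.getD j []).set i 1)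

-- ===== PORT A =====
-- body of A's outer loop over i
def pvStepA (adj : List (List Int)) (gts : List String) (n : Nat)
    (acc : List (List Int)) (i : Nat) : List (List Int) :=
  let gt := gts.getD i ""
  let parents := (List.range n).filter (fun j => pvCell adj j i == 1)
  parents.foldl (fun a j =>
    let other := parents.filter (fun p => p != j)
    if gt == "OR" then
      (if other.all (fun p => pvCell adj p i == 0) then pvSet2 a j i else a)
    else if gt == "AND" then
      (if other.all (fun p => pvCell adj p i == 1) then pvSet2 a j i else a)
    else a) acc

def find_discoverable_parents (adj_matrix : List (List Int)) (gate_types : List String) : List (List Int) :=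
  let n := adj_matrix.length
  (List.range n).foldl (pvStepA adj_matrix gate_types n)
    (List.replicate n (List.replicate n (0 : Int)))

-- ===== PORT B =====
-- B's 'while True: i = row.index(1, start, n) … start = i + 1' loop: the C-level index call plus
-- the while loop perform one left-to-right scan over positions start … min(n, len(row)) - 1,
-- collecting the positions holding 1; this recursion is that scan, step for step (exact).
def pvScanGo (row : List Int) (n : Nat) : Nat → Nat → List Nat
  | start, fuel + 1 =>
    if start < n ∧ start < row.length then
      (if row.getD start 0 == 1 then start :: pvScanGo row n (start + 1) fuel
       else pvScanGo row n (start + 1) fuel)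
    else []
  | _, 0 => []

def pvScanRow (row : List Int) (n start : Nat) : List Nat :=
  pvScanGo row n start (n - start)

-- Python's enumerate(xs) starting at j0
def pvEnum {α : Type} (j0 : Nat) (rows : List α) : List (Nat × α) :=
  match rows with
  | [] => []
  | r :: rs => (j0, r) :: pvEnum (j0 + 1) rs

-- body of B's first loop: 'for i in <hits of row>: parents[i].append(j)'
def pvStepRow (n : Nat) (ps : List (List Nat)) (jrow : Nat × List Int) : List (List Nat) :=
  (pvScanRow jrow.2 n 0).foldl (fun ps i => ps.set i (ps.getD i [] ++ [jrow.1])) ps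

-- B's first loop: parents of every column, built in one row-major pass
def pvBuildParents (adj : List (List Int)) (n : Nat) : List (List Nat) :=
  (pvEnum 0 adj).foldl (pvStepRow n) (List.replicate n [])

-- body of B's second loop over i
def pvStepB (gts : List String) (parents : List (List Nat))
    (acc : List (List Int)) (i : Nat) : List (List Int) :=
  let col := parents.getD i []
  let gt := gts.getD i ""
  if gt == "AND" then
    col.foldl (fun a j => pvSet2 a j i) acc
  else if gt == "OR" && col.length == 1 then
    pvSet2 acc (col.getD 0 0) i
  else acc

def find_discoverable_parents_alt (adj_matrix : List (List Int)) (gate_types : List String) : List (List Int) :=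
  let n := adj_matrix.length
  let parents := pvBuildParents adj_matrix n
  (List.range n).foldl (pvStepB gate_types parents)
    (List.replicate n (List.replicate n (0 : Int)))

-- ===== PRECONDITION & SPEC =====
-- Pre_: exactly where Python A returns (A indexes gate_types[i] and adj_matrix[j][i]
-- for all i, j < n, so gate_types and every row must have length ≥ n).
def Pre_find_discoverable_parents (adj_matrix : List (List Int)) (gate_types : List String) : Prop :=
  adj_matrix.length ≤ gate_types.length ∧
  ∀ row ∈ adj_matrix, adj_matrix.length ≤ row.length
instance (adj_matrix : List (List Int)) (gate_types : List String) : Decidable (Pre_find_discoverable_parents adj_matrix gate_types) := by unfold Pre_find_discoverable_parents; infer_instance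

def pvWitness_find_discoverable_parents : List (List Int) × List String :=
  ([[1, 1], [0, 1]], ["AND", "OR"])

def Spec_find_discoverable_parents (adj_matrix : List (List Int)) (gate_types : List String) (out : List (List Int)) : Prop := out = find_discoverable_parents_alt adj_matrix gate_types
instance (adj_matrix : List (List Int)) (gate_types : List String) (out : List (List Int)) : Decidable (Spec_find_discoverable_parents adj_matrix gate_types out) := by unfold Spec_find_discoverable_parents; infer_instance

-- ===== CLAIM (what is proved, stated in full; the proofs are below) =====
def Claim_equal_find_discoverable_parents : Prop := ∀ (adj_matrix : List (List Int)) (gate_types : List String), Dom_find_discoverable_parents adj_matrix gate_types → Pre_find_discoverable_parents adj_matrix gate_types → Spec_find_discoverable_parents adj_matrix gate_types (find_discoverable_parents adj_matrix gate_types)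

-- ===== LEMMAS AND PROOFS =====

-- B's row scan is the increasing list of positions in [start, n) that hold 1
theorem pv_scanGo_eq (row : List Int) (n : Nat) : ∀ fuel start, n - start ≤ fuel →
    pvScanGo row n start fuel = (List.range' start (n - start)).filter (fun i => row.getD i 0 == 1) := by
  intro fuel
  induction fuel with
  | zero =>
      intro start hle
      have h0 : n - start = 0 := by omega
      simp [pvScanGo, h0]
  | succ fuel ih =>
      intro start hle
      by_cases h : start < n ∧ start < row.length
      · have hr : List.range' start (n - start) = start :: List.range' (start + 1) (n - (start + 1)) := by
          have : n - start = (n - (start + 1)) + 1 := by omega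
          rw [this, List.range'_succ]
        rw [pvScanGo, if_pos h, hr, List.filter_cons, ih (start + 1) (by omega)]
      · rw [pvScanGo, if_neg h]
        by_cases hn : start < n
        · have hlen : row.length ≤ start := by omega
          symm
          rw [List.filter_eq_nil_iff]
          intro i hi
          have h1 : start ≤ i := (List.mem_range'_1.mp hi).1
          have h2 : row.getD i 0 = 0 := List.getD_eq_default _ _ (by omega)
          simp only [List.getD] at h2
          simp [h2]
        · have h0 : n - start = 0 := by omega
          simp [h0]

theorem pv_scanRow_eq (row : List Int) (n : Nat) : ∀ start,
    pvScanRow row n start = (List.range' start (n - start)).filter (fun i => row.getD i 0 == 1) :=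
  fun start => pv_scanGo_eq row n (n - start) start (Nat.le_refl _)

theorem pv_mem_scanRow (row : List Int) (n i : Nat) :
    i ∈ pvScanRow row n 0 ↔ i < n ∧ row.getD i 0 = 1 := by
  rw [pv_scanRow_eq, List.mem_filter]
  simp only [List.mem_range'_1, List.getD, beq_iff_eq]
  omega

theorem pv_scanRow_nodup (row : List Int) (n : Nat) : (pvScanRow row n 0).Nodup := by
  rw [pv_scanRow_eq]
  exact (List.nodup_range' ..).filter _

-- the append-at-index fold: length is preserved …
theorem pv_appendFold_length (j : Nat) (S : List Nat) (ps : List (List Nat)) :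
    (S.foldl (fun ps i => ps.set i (ps.getD i [] ++ [j])) ps).length = ps.length := by
  induction S generalizing ps with
  | nil => rfl
  | cons x S ih => rw [List.foldl_cons, ih, List.length_set]

-- … and each slot receives [j] exactly when its index is in the (nodup, in-range) index list
theorem pv_appendFold_getD (j : Nat) (S : List Nat) (ps : List (List Nat)) (i : Nat)
    (hnd : S.Nodup) (hrange : ∀ k ∈ S, k < ps.length) :
    (S.foldl (fun ps i => ps.set i (ps.getD i [] ++ [j])) ps).getD i []
      = ps.getD i [] ++ (if i ∈ S then [j] else []) := by
  induction S generalizing ps with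
  | nil => simp
  | cons x S ih =>
      rw [List.foldl_cons]
      have hx : x < ps.length := hrange x (by simp)
      have hset_len : (ps.set x (ps.getD x [] ++ [j])).length = ps.length := List.length_set ..
      have hrec := ih (ps.set x (ps.getD x [] ++ [j]))
        (List.nodup_cons.mp hnd).2
        (fun k hk => hset_len ▸ hrange k (List.mem_cons_of_mem _ hk))
      rw [hrec]
      by_cases hix : i = x
      · subst hix
        have hiS : i ∉ S := (List.nodup_cons.mp hnd).1
        simp [hiS, List.getD, hx]
      · have : (ps.set x (ps.getD x [] ++ [j])).getD i [] = ps.getD i [] := by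
          simp [List.getD, List.getElem?_set_ne (by omega : x ≠ i)]
        rw [this]
        simp [List.mem_cons, hix]

-- B's first loop, characterised: slot i collects (in order) the row indices whose row has 1 at i
theorem pv_buildFold_getD (n i : Nat) (hi : i < n) :
    ∀ (rows : List (List Int)) (j0 : Nat) (ps : List (List Nat)), ps.length = n →
    ((pvEnum j0 rows).foldl (pvStepRow n) ps).getD i []
      = ps.getD i [] ++ ((pvEnum j0 rows).filter (fun p => p.2.getD i 0 == 1)).map (·.1) := by
  intro rows
  induction rows with
  | nil => intro j0 ps _; simp [pvEnum]
  | cons row rest ih =>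
      intro j0 ps hlen
      rw [pvEnum, List.foldl_cons]
      have hlen1 : (pvStepRow n ps (j0, row)).length = n := by
        rw [pvStepRow, pv_appendFold_length, hlen]
      rw [ih (j0 + 1) _ hlen1]
      have hstep : (pvStepRow n ps (j0, row)).getD i []
          = ps.getD i [] ++ (if row.getD i 0 == 1 then [j0] else []) := by
        rw [pvStepRow, pv_appendFold_getD _ _ _ _ (pv_scanRow_nodup row n)
          (fun k hk => by rw [hlen]; exact ((pv_mem_scanRow row n k).mp hk).1)]
        by_cases hhit : row.getD i 0 = 1
        · have hb : (row.getD i 0 == 1) = true := by simpa using hhit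
          simp only [hb, if_pos ((pv_mem_scanRow row n i).mpr ⟨hi, hhit⟩), if_true]
        · have hb : (row.getD i 0 == 1) = false := by simpa using hhit
          have hnm : i ∉ pvScanRow row n 0 := fun hmem => hhit ((pv_mem_scanRow row n i).mp hmem).2
          simp only [hb, if_neg hnm]
          simp
      rw [hstep, List.filter_cons, List.append_assoc]
      by_cases hhit : row.getD i 0 = 1
      · simp only [List.getD] at hhit
        simp [hhit]
      · simp only [List.getD] at hhit
        simp [hhit]

-- the collected parent lists agree with A's per-column filters
theorem pv_enum_filter_map (i : Nat) : ∀ (rows : List (List Int)) (j0 : Nat),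
    ((pvEnum j0 rows).filter (fun p => p.2.getD i 0 == 1)).map (·.1)
      = (List.range' j0 rows.length).filter (fun j => (rows.getD (j - j0) []).getD i 0 == 1) := by
  intro rows
  induction rows with
  | nil => intro j0; simp [pvEnum]
  | cons row rest ih =>
      intro j0
      rw [pvEnum, List.length_cons, List.range'_succ, List.filter_cons, List.filter_cons]
      have h0 : (((row : List Int) :: rest).getD (j0 - j0) []) = row := by simp
      have htail : (List.range' (j0 + 1) rest.length).filter
            (fun j => ((row :: rest).getD (j - j0) []).getD i 0 == 1)
          = (List.range' (j0 + 1) rest.length).filter (fun j => (rest.getD (j - (j0 + 1)) []).getD i 0 == 1) := by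
        apply List.filter_congr
        intro j hj
        have h1 : j0 + 1 ≤ j := (List.mem_range'_1.mp hj).1
        have h2 : j - j0 = (j - (j0 + 1)) + 1 := by omega
        rw [h2, List.getD_cons_succ]
      rw [h0]
      by_cases hhit : (row.getD i 0 == 1) = true
      · rw [if_pos hhit, if_pos hhit, htail, List.map_cons, ih]
      · rw [if_neg hhit, if_neg hhit, htail, ih]

theorem pv_buildParents_getD (adj : List (List Int)) (i : Nat) (hi : i < adj.length) :
    (pvBuildParents adj adj.length).getD i []
      = (List.range adj.length).filter (fun j => pvCell adj j i == 1) := by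
  rw [pvBuildParents, pv_buildFold_getD adj.length i hi adj 0 _ (List.length_replicate ..),
    pv_enum_filter_map]
  have : (List.replicate adj.length ([] : List Nat)).getD i [] = [] := by
    simp [List.getD, hi]
  rw [this, List.nil_append, List.range_eq_range']
  apply List.filter_congr
  intro j _
  simp [pvCell]

-- the two per-column bodies agree whenever col is the column's parent filter
theorem pv_step_eq (adj : List (List Int)) (gts : List String) (n : Nat)
    (parents : List (List Nat)) (acc : List (List Int)) (i : Nat)
    (hcol : parents.getD i [] = (List.range n).filter (fun j => pvCell adj j i == 1)) :
    pvStepA adj gts n acc i = pvStepB gts parents acc i := by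
  unfold pvStepA pvStepB
  rw [hcol]
  set cols := (List.range n).filter (fun j => pvCell adj j i == 1) with hcols
  have hone : ∀ j ∈ cols, pvCell adj j i = 1 := by
    intro j hj
    have := (List.mem_filter.mp hj).2
    simpa using this
  have hnd : cols.Nodup := (List.nodup_range).filter _
  clear_value cols
  clear hcols
  by_cases hOR : gts.getD i "" = "OR"
  · -- OR gate: A marks j iff the other-parents list is empty, i.e. cols = [j]
    simp only [hOR, show (("OR" : String) == "OR") = true from by decide,
      show (("OR" : String) == "AND") = false from by decide,
      Bool.true_and, if_true, Bool.false_eq_true, if_false]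
    match cols, hone, hnd with
    | [], _, _ => simp
    | [j0], _, _ => simp [List.filter]
    | j0 :: j1 :: rest, hone, hnd =>
        have hne : j0 ≠ j1 := by
          intro h; exact (List.nodup_cons.mp hnd).1 (h ▸ List.mem_cons_self ..)
        have hfalse : ∀ j ∈ j0 :: j1 :: rest, ∀ (a : List (List Int)),
            (if ((j0 :: j1 :: rest).filter (fun p => p != j)).all
                  (fun p => pvCell adj p i == 0) then pvSet2 a j i else a) = a := by
          intro j _ a
          -- pick p ∈ {j0, j1} with p ≠ j; its cell is 1, so the all-check fails
          obtain ⟨p, hpmem, hpne⟩ : ∃ p, p ∈ j0 :: j1 :: rest ∧ p ≠ j := by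
            by_cases h0 : j0 = j
            · exact ⟨j1, by simp, by rw [← h0]; exact (Ne.symm hne)⟩
            · exact ⟨j0, by simp, h0⟩
          have hall : (((j0 :: j1 :: rest).filter (fun p => p != j)).all
              (fun p => pvCell adj p i == 0)) = false := by
            rw [List.all_eq_false]
            exact ⟨p, List.mem_filter.mpr ⟨hpmem, by simpa using hpne⟩,
              by simp [hone p hpmem]⟩
          simp [hall]
        rw [PySem.List.foldl_congr_mem' _ _ (fun a _ => a) _ hfalse, PySem.List.foldl_ignore]
        simp
  · by_cases hAND : gts.getD i "" = "AND"
    · -- AND gate: A's all-check always succeeds, leaving B's plain marking fold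
      simp only [hAND, show (("AND" : String) == "OR") = false from by decide,
        show (("AND" : String) == "AND") = true from by decide,
        Bool.false_eq_true, if_false, if_true]
      apply PySem.List.foldl_congr_mem'
      intro j hj a
      have hall : (cols.filter (fun p => p != j)).all
          (fun p => pvCell adj p i == 1) = true := by
        rw [List.all_eq_true]
        intro p hp
        simpa using hone p (List.mem_filter.mp hp).1
      simp [hall]
    · -- any other gate type: both leave the accumulator unchanged
      have e1 : (gts.getD i "" == "OR") = false := by simpa using hOR
      have e2 : (gts.getD i "" == "AND") = false := by simpa using hAND
      simp only [e1, e2, Bool.false_eq_true, if_false, Bool.false_and]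
      exact PySem.List.foldl_ignore _ _

-- ===== VERDICT (by name: the statement is the Claim_ definition above) =====
theorem find_discoverable_parents_spec : Claim_equal_find_discoverable_parents := by
  intro adj gts _ _
  unfold Spec_find_discoverable_parents find_discoverable_parents find_discoverable_parents_alt
  exact PySem.List.foldl_congr_mem' (List.range adj.length)
    (pvStepA adj gts adj.length) (pvStepB gts (pvBuildParents adj adj.length))
    (List.replicate adj.length (List.replicate adj.length 0))
    (fun i hi acc => pv_step_eq adj gts adj.length _ acc i
      (pv_buildParents_getD adj i (List.mem_range.mp hi)))
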